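/- GENERATED by farm/mkstatement.py from design/units.tsv (unit `start_decoder.C14a`) and the assertions of Vorbis/Spec/StartDecoderC14.lean — do not edit.
   THE STATEMENT of the proof unit `start_decoder.C14a`: segment C14a of `start_decoder` (3 instructions; entries 0x1150b9;
   exits 0x1150ca; ranges 0x1150b9-0x1150c5)
   takes each of its entry assertions to one of its exit assertions (`Vorbis.Spec.StartDecoder.SegC14a`), given the contracts of its callees.
   What the names mean: Vorbis/Spec/Basic.lean (the shared hypotheses), Vorbis/Spec/StartDecoderC14.lean (the assertions). The theorem to prove:
   `theorem start_decoder_C14a_ok : Vorbis.Spec.start_decoder_C14a.Statement`. -/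
import Vorbis.Spec.Alloc
import Vorbis.Spec.StartDecoderC14
namespace Vorbis.Spec.start_decoder_C14a
open X86 X86.User Asan

/-- The statement of unit `start_decoder.C14a`. -/
def Statement : Prop :=
  ∀ (Lay : Layout) (_hLay : Lay.hi = 0x1000000) (μ : Microarch) (_hμ : UserX.MicroOK μ) (u₀ : State)
    (_hcode : HasCodeNat Lay u₀ Vorbis.L.start_decoder.entry Vorbis.Code.code_start_decoder.nat Vorbis.L.start_decoder.size)
    (_h_setup_malloc : ∀ (others : List Obj) (frames : List (Nat × FrameLayout)) (A : Arena), Calls Lay μ Vorbis.WayInv (Vorbis.conv u₀) Vorbis.L.setup_malloc.entry (Vorbis.Spec.setup_malloc.spec others frames A)),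
    Vorbis.Spec.StartDecoder.SegC14a Lay μ u₀

end Vorbis.Spec.start_decoder_C14a
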